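-- pv_equiv track=rewrite | github.com/pypi-data/pypi-mirror-92 | packages/p01.checker/p01.checker-0.5.9.tar.gz/p01.checker-0.5.9/src/p01/checker/checker.py | fixcontent
-- ===== SOURCE A (Python) =====
-- def fixcontent(lines):
--     #pyflakes does not like CRLF linefeeds
--     #and files ending with comments
--     idx = len(lines)-1
--     lastline = lines[idx].strip()
--     while idx >= 1 and (lastline == '' or lastline.startswith('#')):
--         del lines[idx]
--         idx -= 1
--         lastline = lines[idx].strip()
--
--     content = '\n'.join(lines)
--     return content
-- ===== SOURCE B (Python) =====
-- def fixcontent(lines):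
--     # Single forward pass: remember the index of the last significant line
--     # (non-blank, not a comment); keep everything through that index.
--     last = 0
--     for i, line in enumerate(lines):
--         s = line.strip()
--         if s and not s.startswith('#'):
--             last = i
--     del lines[last + 1:]
--     return '\n'.join(lines)
-- ===== Notes on version B (the rewrite author's own statement) =====
-- stated objective: simpler
-- what changed: B replaces A's backwards while-loop that repeatedly deletes the last element with one forward pass recording the last significant line's index followed by a single truncation.
import Mathlib
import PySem

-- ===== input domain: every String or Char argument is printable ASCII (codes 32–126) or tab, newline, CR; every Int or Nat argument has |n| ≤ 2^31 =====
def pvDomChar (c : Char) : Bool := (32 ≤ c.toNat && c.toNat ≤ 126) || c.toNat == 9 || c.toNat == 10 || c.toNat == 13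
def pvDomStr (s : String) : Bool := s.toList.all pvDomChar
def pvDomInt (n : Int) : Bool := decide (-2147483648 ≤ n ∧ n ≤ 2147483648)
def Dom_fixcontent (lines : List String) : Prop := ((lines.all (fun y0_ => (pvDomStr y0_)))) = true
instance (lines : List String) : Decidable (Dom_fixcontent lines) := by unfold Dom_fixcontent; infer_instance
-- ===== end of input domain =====

-- B replaces A's backwards delete-last while-loop with one forward pass that records the
-- last significant line's index and truncates once (objective: simpler). Both A and B
-- mutate the Python argument in place the same way; equivalence here is about the return value.

-- ===== PORT A =====
-- while idx >= 1 and (lastline == '' or lastline.startswith('#')): del lines[idx]; idx -= 1; lastline = lines[idx].strip()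
-- (idx is always the last index, so 'del lines[idx]' is 'take idx'; the loop counter idx drives the recursion)
def fixA_loop : List String → Nat → String → List String
  | lines, 0, _ => lines
  | lines, j+1, lastline =>
    if lastline = "" ∨ PySem.Str.startswith lastline "#" = true then
      fixA_loop (lines.take (j+1)) j
        (PySem.Str.strip ((PySem.List.pyGet? (lines.take (j+1)) (j : Int)).getD ""))
    else lines

def fixcontent (lines : List String) : String :=
  match PySem.List.pyGet? lines ((lines.length : Int) - 1) with
  | none => ""   -- IndexError on the empty list; excluded by Pre_fixcontent
  | some l => PySem.Str.join "\n" (fixA_loop lines (lines.length - 1) (PySem.Str.strip l))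

-- ===== PORT B =====
-- one forward pass: (i, last), last = index of the latest significant line, default 0; then truncate and join
def fixcontent_alt (lines : List String) : String :=
  let last := (lines.foldl (fun (st : Nat × Nat) line =>
      let s := PySem.Str.strip line
      (st.1 + 1, if s ≠ "" ∧ PySem.Str.startswith s "#" = false then st.1 else st.2)) (0, 0)).2
  PySem.Str.join "\n" (lines.take (last + 1))

-- ===== PRECONDITION & SPEC =====
-- A raises IndexError on the empty list (lines[-1]); Pre_ excludes exactly that input.
def Pre_fixcontent (lines : List String) : Prop := lines ≠ []
instance (lines : List String) : Decidable (Pre_fixcontent lines) := by unfold Pre_fixcontent; infer_instance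
def pvWitness_fixcontent : List String := (["x", "", "# c"])

def Spec_fixcontent (lines : List String) (out : String) : Prop := out = fixcontent_alt lines
instance (lines : List String) (out : String) : Decidable (Spec_fixcontent lines out) := by unfold Spec_fixcontent; infer_instance

-- ===== CLAIM (what is proved, stated in full; the proofs are below) =====
def Claim_equal_fixcontent : Prop := ∀ (lines : List String), Dom_fixcontent lines → Pre_fixcontent lines → Spec_fixcontent lines (fixcontent lines)

-- ===== LEMMAS AND PROOFS =====

-- B's fold step and its final index ("last significant line, default 0")
def pvStep (st : Nat × Nat) (line : String) : Nat × Nat :=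
  let s := PySem.Str.strip line
  (st.1 + 1, if s ≠ "" ∧ PySem.Str.startswith s "#" = false then st.1 else st.2)

def lastSig (lines : List String) : Nat := (lines.foldl pvStep (0, 0)).2

lemma pvStep_fst (st : Nat × Nat) (x : String) : (pvStep st x).1 = st.1 + 1 := rfl

lemma pvStep_snd (st : Nat × Nat) (x : String) :
    (pvStep st x).2 =
      if PySem.Str.strip x ≠ "" ∧ PySem.Str.startswith (PySem.Str.strip x) "#" = false
      then st.1 else st.2 := rfl

lemma foldl_step_fst (l : List String) (st : Nat × Nat) :
    (l.foldl pvStep st).1 = st.1 + l.length := by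
  induction l generalizing st with
  | nil => simp
  | cons x xs ih => rw [List.foldl_cons, ih, pvStep_fst]; simp; omega

lemma foldl_step_snd_lt (l : List String) (st : Nat × Nat) :
    (l.foldl pvStep st).2 = st.2 ∨ (l.foldl pvStep st).2 < st.1 + l.length := by
  induction l generalizing st with
  | nil => left; rfl
  | cons x xs ih =>
    rcases ih (pvStep st x) with h | h
    · rw [List.foldl_cons, h, pvStep_snd]
      split
      · right; simp only [List.length_cons]; omega
      · left; rfl
    · right
      rw [pvStep_fst] at h
      rw [List.foldl_cons]
      simp only [List.length_cons]
      omega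

lemma lastSig_lt (l : List String) (h : l ≠ []) : lastSig l < l.length := by
  unfold lastSig
  rcases foldl_step_snd_lt l (0, 0) with h2 | h2
  · rw [h2]; cases l with
    | nil => exact absurd rfl h
    | cons a as => simp
  · simpa using h2

lemma lastSig_concat (l : List String) (x : String) :
    lastSig (l ++ [x]) =
      if PySem.Str.strip x ≠ "" ∧ PySem.Str.startswith (PySem.Str.strip x) "#" = false
      then l.length else lastSig l := by
  unfold lastSig
  rw [List.foldl_append]
  simp only [List.foldl_cons, List.foldl_nil]
  rw [pvStep_snd, foldl_step_fst]
  split <;> simp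

lemma alt_eq (lines : List String) :
    fixcontent_alt lines = PySem.Str.join "\n" (lines.take (lastSig lines + 1)) := rfl

lemma fixA_loop_eq (lines : List String) (s : String) (h : lines.getLast? = some s) :
    fixA_loop lines (lines.length - 1) (PySem.Str.strip s)
      = lines.take (lastSig lines + 1) := by
  induction lines using List.reverseRecOn generalizing s with
  | nil => simp at h
  | append_singleton l x ih =>
    have hx : x = s := by simpa using h
    subst hx
    cases l with
    | nil => simp [fixA_loop, lastSig, pvStep]
    | cons a as =>
      have hlen : ((a :: as) ++ [x]).length - 1 = (a :: as).length := by simp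
      rw [hlen]
      show fixA_loop ((a :: as) ++ [x]) ((a :: as).length - 1 + 1) (PySem.Str.strip x) = _
      rw [fixA_loop]
      by_cases hsig : PySem.Str.strip x ≠ "" ∧ PySem.Str.startswith (PySem.Str.strip x) "#" = false
      · -- last line significant: the loop exits at once, everything is kept
        have hcond : ¬ (PySem.Str.strip x = "" ∨ PySem.Str.startswith (PySem.Str.strip x) "#" = true) := by
          rintro (h1 | h2)
          · exact hsig.1 h1
          · rw [hsig.2] at h2; exact Bool.false_ne_true h2
        rw [if_neg hcond, lastSig_concat, if_pos hsig]
        have hhh : (a :: as).length + 1 = ((a :: as) ++ [x]).length := by simp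
        rw [hhh, List.take_length]
      · -- last line blank/comment: delete it and recurse on the init
        have hcond : PySem.Str.strip x = "" ∨ PySem.Str.startswith (PySem.Str.strip x) "#" = true := by
          rcases Decidable.em (PySem.Str.strip x = "") with h1 | h1
          · exact Or.inl h1
          · rcases Bool.eq_false_or_eq_true (PySem.Str.startswith (PySem.Str.strip x) "#") with h2 | h2
            · exact Or.inr h2
            · exact absurd ⟨h1, h2⟩ hsig
        rw [if_pos hcond]
        have h1 : (a :: as).length - 1 + 1 = (a :: as).length := by simp
        rw [h1, List.take_left]
        have hne : a :: as ≠ ([] : List String) := by simp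
        obtain ⟨y, hy⟩ := Option.isSome_iff_exists.mp (List.getLast?_isSome.mpr hne)
        have hget : PySem.List.pyGet? (a :: as) (((a :: as).length - 1 : Nat) : Int)
            = (a :: as).getLast? := by
          rw [PySem.List.pyGet?_natCast, List.getLast?_eq_getElem?]
        rw [hget, hy, Option.getD_some, ih y hy, lastSig_concat, if_neg hsig]
        exact (List.take_append_of_le_length (lastSig_lt _ hne)).symm ▸ rfl

-- ===== VERDICT (by name: the statement is the Claim_ definition above) =====
theorem fixcontent_spec : Claim_equal_fixcontent := by
  intro lines _ hpre
  unfold Spec_fixcontent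
  obtain ⟨s, hs⟩ : ∃ s, lines.getLast? = some s := by
    cases h : lines.getLast? with
    | none => exact absurd (List.getLast?_eq_none_iff.mp h) hpre
    | some v => exact ⟨v, rfl⟩
  have hc : ((lines.length : Int) - 1) = (((lines.length - 1 : Nat)) : Int) := by
    cases lines with
    | nil => exact absurd rfl hpre
    | cons a as => simp
  have hget : PySem.List.pyGet? lines ((lines.length : Int) - 1) = some s := by
    rw [hc, PySem.List.pyGet?_natCast, ← List.getLast?_eq_getElem?, hs]
  unfold fixcontent
  rw [hget]
  show PySem.Str.join "\n" (fixA_loop lines (lines.length - 1) (PySem.Str.strip s)) = fixcontent_alt lines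
  rw [fixA_loop_eq lines s hs, alt_eq]
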